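-- pv_equiv track=rewrite | github.com/hivehelsinki/remote-challs | chall04/ptuukkan.py | fall_sand
-- ===== SOURCE A (Python) =====
-- def fall_sand(vlines):
-- 	"Simulates falling of sand for each line"
-- 	fallen_lines = []
-- 	for line in vlines:
-- 		i = 0
-- 		splitted = line.split('#')
-- 		for part in splitted:
-- 			splitted[i] = part.replace(" ", "").rjust(len(part), " ")
-- 			i += 1
-- 		fallen_lines.append("#".join(splitted))
-- 	return fallen_lines
-- ===== SOURCE B (Python) =====
-- def fall_sand(vlines):
--     "Simulates falling of sand for each line (single scan per line, no split/replace/rjust)"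
--     fallen_lines = []
--     for line in vlines:
--         res = []
--         buf = []
--         seg_len = 0
--         for c in line:
--             if c == '#':
--                 res.append(' ' * (seg_len - len(buf)))
--                 res.extend(buf)
--                 res.append('#')
--                 buf = []
--                 seg_len = 0
--             else:
--                 seg_len += 1
--                 if c != ' ':
--                     buf.append(c)
--         res.append(' ' * (seg_len - len(buf)))
--         res.extend(buf)
--         fallen_lines.append(''.join(res))
--     return fallen_lines
-- ===== Notes on version B (the rewrite author's own statement) =====
-- stated objective: alternative
-- what changed: Replaces the split('#')/replace/rjust/join pipeline with one explicit left-to-right character scan per line that keeps a buffer of non-space characters and a segment-length counter, flushing padded segments at each '#' and at end of line.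
import Mathlib
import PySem

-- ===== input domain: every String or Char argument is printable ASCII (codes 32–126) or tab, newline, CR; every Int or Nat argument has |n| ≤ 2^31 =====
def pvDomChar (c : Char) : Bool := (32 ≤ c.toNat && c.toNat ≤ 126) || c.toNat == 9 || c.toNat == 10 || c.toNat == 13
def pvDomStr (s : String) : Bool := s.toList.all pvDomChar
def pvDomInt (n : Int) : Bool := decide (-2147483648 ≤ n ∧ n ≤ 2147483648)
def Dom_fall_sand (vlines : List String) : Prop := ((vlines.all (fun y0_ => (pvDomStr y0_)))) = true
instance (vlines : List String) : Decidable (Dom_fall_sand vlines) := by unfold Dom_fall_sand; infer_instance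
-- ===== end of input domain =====

-- B replaces A's split/replace/rjust/join pipeline by a single character scan per line (alternative decomposition, same cost).


-- ===== PORT A =====
-- line.split('#') — hand port of str.split, exact for the one-character separator '#' used here
def splitHash : List Char → List (List Char)
  | [] => [[]]
  | c :: rest =>
      if c = '#' then [] :: splitHash rest
      else
        match splitHash rest with
        | p :: ps => (c :: p) :: ps
        | [] => [[c]]   -- unreachable: splitHash never returns []

-- part.replace(" ", "") — hand port of str.replace, exact for the one-character old "" new used here
def removeSpaces : List Char → List Char
  | [] => []
  | c :: rest => if c = ' ' then removeSpaces rest else c :: removeSpaces rest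

-- s.rjust(w, " ") — hand port: left-pad with spaces to width w (no-op when already long enough)
def rjustSpaces (s : List Char) (w : Nat) : List Char := List.replicate (w - s.length) ' ' ++ s

-- "#".join(parts) — hand port of str.join, exact for the one-character separator '#'
def joinHash : List (List Char) → List Char
  | [] => []
  | [p] => p
  | p :: ps => p ++ '#' :: joinHash ps

def fall_sand (vlines : List String) : List String :=
  vlines.map (fun line =>
    String.ofList (joinHash ((splitHash line.toList).map
      (fun part => rjustSpaces (removeSpaces part) part.length))))

-- ===== PORT B =====
-- the per-line scan of Source B: buf = non-space chars seen, segLen = chars since last '#'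
def scanLine : List Char → List Char → Nat → List Char
  | [], buf, segLen => List.replicate (segLen - buf.length) ' ' ++ buf
  | c :: rest, buf, segLen =>
      if c = '#' then
        (List.replicate (segLen - buf.length) ' ' ++ buf) ++ '#' :: scanLine rest [] 0
      else if c = ' ' then scanLine rest buf (segLen + 1)
      else scanLine rest (buf ++ [c]) (segLen + 1)

def fall_sand_alt (vlines : List String) : List String :=
  vlines.map (fun line => String.ofList (scanLine line.toList [] 0))

-- ===== PRECONDITION & SPEC =====
def Spec_fall_sand (vlines : List String) (out : List String) : Prop := out = fall_sand_alt vlines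
instance (vlines : List String) (out : List String) : Decidable (Spec_fall_sand vlines out) := by unfold Spec_fall_sand; infer_instance

-- ===== CLAIM (what is proved, stated in full; the proofs are below) =====
def Claim_equal_fall_sand : Prop := ∀ (vlines : List String), Dom_fall_sand vlines → Spec_fall_sand vlines (fall_sand vlines)

-- ===== LEMMAS AND PROOFS =====

-- A's transform of one segment
def segA (part : List Char) : List Char := rjustSpaces (removeSpaces part) part.length

-- the '#'-prefixed tail segments as A emits them after the first segment
def tailA : List (List Char) → List Char
  | [] => []
  | q :: qs => '#' :: (segA q ++ tailA qs)

lemma splitHash_ne_nil (cs : List Char) : splitHash cs ≠ [] := by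
  cases cs with
  | nil => simp [splitHash]
  | cons c rest =>
    simp only [splitHash]
    split
    · simp
    · split <;> simp

lemma scan_eq (cs : List Char) : ∀ buf seg,
    scanLine cs buf seg =
      List.replicate ((seg + (splitHash cs).head!.length)
          - (buf.length + (removeSpaces (splitHash cs).head!).length)) ' '
        ++ buf ++ removeSpaces (splitHash cs).head! ++ tailA (splitHash cs).tail := by
  induction cs with
  | nil =>
    intro buf seg
    simp [scanLine, splitHash, removeSpaces, tailA]
  | cons c rest ih =>
    intro buf seg
    by_cases hc : c = '#'
    · subst hc
      obtain ⟨h, t, hsplit⟩ : ∃ h t, splitHash rest = h :: t := by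
        cases hs : splitHash rest with
        | nil => exact absurd hs (splitHash_ne_nil rest)
        | cons h t => exact ⟨h, t, rfl⟩
      simp only [scanLine, splitHash, if_pos rfl, ih, hsplit, List.head!, List.tail,
        removeSpaces]
      simp [tailA, segA, rjustSpaces, removeSpaces, List.append_assoc]
    · obtain ⟨h, t, hsplit⟩ : ∃ h t, splitHash rest = h :: t := by
        cases hs : splitHash rest with
        | nil => exact absurd hs (splitHash_ne_nil rest)
        | cons h t => exact ⟨h, t, rfl⟩
      have hsp : splitHash (c :: rest) = (c :: h) :: t := by
        simp only [splitHash, if_neg hc, hsplit]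
      by_cases hsp' : c = ' '
      · subst hsp'
        simp only [scanLine, if_neg hc, if_pos rfl, ih, hsplit, hsp, List.head!, List.tail,
          removeSpaces, if_pos rfl, List.length_cons]
        have : seg + 1 + h.length = seg + (h.length + 1) := by omega
        rw [this]
        simp
      · simp only [scanLine, if_neg hc, if_neg hsp', ih, hsplit, hsp, List.head!, List.tail,
          removeSpaces, if_neg hsp', List.length_cons, List.length_append, List.length_cons,
          List.length_nil]
        have harith : (seg + 1 + h.length) - ((buf.length + (0 + 1)) + (removeSpaces h).length)
            = (seg + (h.length + 1)) - (buf.length + ((removeSpaces h).length + 1)) := by omega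
        rw [harith]
        simp [List.append_assoc]

lemma joinHash_map_segA (t : List (List Char)) : ∀ h,
    joinHash ((h :: t).map segA) = segA h ++ tailA t := by
  induction t with
  | nil => intro h; simp [joinHash, tailA]
  | cons q qs ih =>
    intro h
    simp only [List.map, joinHash, tailA]
    rw [show (segA q :: qs.map segA) = ((q :: qs).map segA) by simp, ih q]

lemma scanLine_eq_A (cs : List Char) :
    scanLine cs [] 0 = joinHash ((splitHash cs).map segA) := by
  obtain ⟨h, t, hsplit⟩ : ∃ h t, splitHash cs = h :: t := by
    cases hs : splitHash cs with
    | nil => exact absurd hs (splitHash_ne_nil cs)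
    | cons h t => exact ⟨h, t, rfl⟩
  rw [scan_eq cs [] 0, hsplit, joinHash_map_segA]
  simp [List.head!, segA, rjustSpaces]

-- ===== VERDICT (by name: the statement is the Claim_ definition above) =====
theorem fall_sand_spec : Claim_equal_fall_sand := by
  intro vlines _
  unfold Spec_fall_sand fall_sand fall_sand_alt
  refine List.map_congr_left (fun line _ => ?_)
  rw [scanLine_eq_A]
  rfl
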